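-- pv_equiv track=rewrite | github.com/the-real-lunatic/safety-mv | backend/app/main.py | _extract_sentence
-- ===== SOURCE A (Python) =====
-- def _extract_sentence(text: str, pos: int) -> str:
--     if not text:
--         return ""
--     left = max(text.rfind(".", 0, pos), text.rfind("!", 0, pos), text.rfind("?", 0, pos), text.rfind("\n", 0, pos))
--     right_candidates = [
--         text.find(".", pos),
--         text.find("!", pos),
--         text.find("?", pos),
--         text.find("\n", pos),
--     ]
--     right_candidates = [idx for idx in right_candidates if idx != -1]
--     right = min(right_candidates) if right_candidates else len(text)
--     start = left + 1 if left != -1 else 0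
--     end = right + 1 if right < len(text) else len(text)
--     return text[start:end].strip()
-- ===== SOURCE B (Python) =====
-- def _extract_sentence(text: str, pos: int) -> str:
--     if not text:
--         return ""
--     n = len(text)
--     p = pos + n if pos < 0 else pos
--     p = max(0, min(p, n))
--     start = 0
--     for i, ch in enumerate(text):
--         if ch in ".!?\n":
--             if p <= i:
--                 return text[start:i + 1].strip()
--             start = i + 1
--     return text[start:].strip()
-- ===== Notes on version B (the rewrite author's own statement) =====
-- stated objective: alternative
-- what changed: A runs eight staged library rfind/find scans and combines them with max/min to locate the delimiters around pos; B makes one streaming pass over the text with a sentence-start accumulator, returning the current sentence as soon as the terminator that closes the sentence containing the normalized pos is reached.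
import Mathlib
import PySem

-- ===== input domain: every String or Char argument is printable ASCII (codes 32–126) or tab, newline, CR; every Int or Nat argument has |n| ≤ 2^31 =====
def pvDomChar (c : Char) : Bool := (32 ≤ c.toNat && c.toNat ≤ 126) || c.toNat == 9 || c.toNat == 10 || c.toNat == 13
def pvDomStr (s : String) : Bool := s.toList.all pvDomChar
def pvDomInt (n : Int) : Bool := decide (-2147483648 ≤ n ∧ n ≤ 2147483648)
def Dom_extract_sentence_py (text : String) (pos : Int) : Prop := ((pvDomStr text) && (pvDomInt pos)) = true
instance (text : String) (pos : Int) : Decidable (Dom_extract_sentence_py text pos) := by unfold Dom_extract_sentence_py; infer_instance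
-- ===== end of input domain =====

-- B replaces A's eight staged library rfind/find scans (combined by max/min) with a
-- single streaming pass that tracks the current sentence's start and returns as soon
-- as the sentence containing pos is closed; alternative decomposition, no speed claim.

-- ===== PORT A =====
def extract_sentence_py (text : String) (pos : Int) : String :=
  if text = "" then "" else
  let left := max (max (max (PySem.Str.rfindFrom text "." 0 (some pos))
      (PySem.Str.rfindFrom text "!" 0 (some pos)))
      (PySem.Str.rfindFrom text "?" 0 (some pos)))
      (PySem.Str.rfindFrom text "\n" 0 (some pos))
  let right_candidates :=
      [PySem.Str.findFrom text "." pos, PySem.Str.findFrom text "!" pos,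
       PySem.Str.findFrom text "?" pos, PySem.Str.findFrom text "\n" pos]
  let rc := right_candidates.filter (fun idx => decide (idx ≠ -1))
  let right := (PySem.List.min? rc (fun x => x)).getD (PySem.Str.len text)
  let start := if left ≠ -1 then left + 1 else 0
  let stop := if right < PySem.Str.len text then right + 1 else PySem.Str.len text
  PySem.Str.strip (PySem.Str.slice text (some start) (some stop))

-- ===== PORT B =====
def pvIsSent (ch : Char) : Bool := ch == '.' || ch == '!' || ch == '?' || ch == '\n'

-- Source B's single for-loop over enumerate(text): i is the running index, start the
-- index right after the last sentence terminator seen so far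
def pvLoop (text : String) (p : Int) : List Char → Int → Int → String
  | [], _, start => PySem.Str.strip (PySem.Str.slice text (some start) none)
  | ch :: rest, i, start =>
    if pvIsSent ch then
      if p ≤ i then PySem.Str.strip (PySem.Str.slice text (some start) (some (i + 1)))
      else pvLoop text p rest (i + 1) (i + 1)
    else pvLoop text p rest (i + 1) start

def extract_sentence_py_alt (text : String) (pos : Int) : String :=
  if text = "" then "" else
  let n : Int := PySem.Str.len text
  let p0 := if pos < 0 then pos + n else pos
  let p := max 0 (min p0 n)
  pvLoop text p text.toList 0 0

-- ===== PRECONDITION & SPEC =====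
def Spec_extract_sentence_py (text : String) (pos : Int) (out : String) : Prop := out = extract_sentence_py_alt text pos
instance (text : String) (pos : Int) (out : String) : Decidable (Spec_extract_sentence_py text pos out) := by unfold Spec_extract_sentence_py; infer_instance

-- ===== CLAIM (what is proved, stated in full; the proofs are below) =====
def Claim_equal_extract_sentence_py : Prop := ∀ (text : String) (pos : Int), Dom_extract_sentence_py text pos → Spec_extract_sentence_py text pos (extract_sentence_py text pos)

-- ===== LEMMAS AND PROOFS =====

-- greatest j < k with P j (as an Int), else -1 — the shape of A's rfind max
def pvH (P : Nat → Bool) : Nat → Int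
  | 0 => -1
  | k + 1 => if P k then (k : Int) else pvH P k

-- "the character at index j is a sentence terminator" / "is c"
def pvAt (t : List Char) (j : Nat) : Bool :=
  match t[j]? with | some ch => pvIsSent ch | none => false

def pvAtC (c : Char) (t : List Char) (j : Nat) : Bool :=
  match t[j]? with | some ch => c == ch | none => false

theorem pvBeqComm (a b : Char) : (a == b) = (b == a) := by
  rw [Bool.eq_iff_iff]
  simp only [beq_iff_eq]
  exact eq_comm

theorem pvH_lt (P : Nat → Bool) (k : Nat) : pvH P k < (k : Int) := by
  induction k with
  | zero => simp [pvH]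
  | succ k ih => simp only [pvH]; split <;> [push_cast; skip] <;> omega

theorem pvH_ge (P : Nat → Bool) (k : Nat) : -1 ≤ pvH P k := by
  induction k with
  | zero => simp [pvH]
  | succ k ih => simp only [pvH]; split <;> omega

theorem pvH_congr {k : Nat} {P Q : Nat → Bool} (h : ∀ j, j < k → P j = Q j) : pvH P k = pvH Q k := by
  induction k with
  | zero => rfl
  | succ k ih =>
    simp only [pvH, h k (Nat.lt_succ_self k)]
    rw [ih (fun j hj => h j (Nat.lt_succ_of_lt hj))]

theorem pvH_max (P Q : Nat → Bool) (k : Nat) :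
    max (pvH P k) (pvH Q k) = pvH (fun j => P j || Q j) k := by
  induction k with
  | zero => simp [pvH]
  | succ k ih =>
    have h1 := pvH_lt P k
    have h2 := pvH_lt Q k
    simp only [pvH]
    by_cases hP : P k <;> by_cases hQ : Q k <;> simp [hP, hQ, ← ih] <;> omega

theorem pvRfindGo_eq_H (s sub : List Char) (k : Nat) :
    PySem.Chars.rfind.go s sub k = pvH (fun j => sub.isPrefixOf (s.drop j)) (k + 1) := by
  induction k with
  | zero => simp [PySem.Chars.rfind.go, pvH]
  | succ k ih => simp [PySem.Chars.rfind.go, pvH, ih]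

theorem pvRfind_ge (t sub : List Char) : -1 ≤ PySem.Chars.rfind t sub := by
  show -1 ≤ PySem.Chars.rfind.go _ _ _
  rw [pvRfindGo_eq_H]
  exact pvH_ge _ _

-- prefix of a single-character pattern = that character at the index
theorem pvPrefSingle (t : List Char) (j : Nat) (c : Char) :
    List.isPrefixOf [c] (t.drop j) = pvAtC c t j := by
  have h0 : (t.drop j)[0]? = t[j]? := by simp [List.getElem?_drop]
  cases hd : t.drop j with
  | nil => rw [hd] at h0; simp [List.isPrefixOf, pvAtC, ← h0]
  | cons h rest =>
    rw [hd] at h0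
    simp only [List.getElem?_cons_zero] at h0
    simp [List.isPrefixOf, pvAtC, ← h0, Bool.and_comm]

-- first index ≥ k (counting the head of t as index k) whose char satisfies P, else -1
def pvFF (P : Char → Bool) : List Char → Int → Int
  | [], _ => -1
  | h :: t, k => if P h then k else pvFF P t (k + 1)

theorem pvFF_ge (P : Char → Bool) (t : List Char) (k : Int) (hk : 0 ≤ k)
    (h : pvFF P t k ≠ -1) : k ≤ pvFF P t k := by
  induction t generalizing k with
  | nil => simp [pvFF] at h
  | cons c t ih =>
    simp only [pvFF] at h ⊢
    split
    · omega
    · rename_i hc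
      rw [if_neg hc] at h
      have := ih (k + 1) (by omega) h
      omega

theorem pvFF_lt (P : Char → Bool) (t : List Char) (k : Int)
    (h : pvFF P t k ≠ -1) : pvFF P t k < k + t.length := by
  induction t generalizing k with
  | nil => simp [pvFF] at h
  | cons c t ih =>
    simp only [pvFF, List.length_cons] at h ⊢
    split
    · push_cast; omega
    · rename_i hc
      rw [if_neg hc] at h
      have := ih (k + 1) h
      push_cast at this ⊢
      omega

def pvCmb (a b : Int) : Int := if a = -1 then b else if b = -1 then a else min a b

theorem pvFF_cmb (P Q : Char → Bool) (t : List Char) (k : Int) (hk : 0 ≤ k) :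
    pvCmb (pvFF P t k) (pvFF Q t k) = pvFF (fun h => P h || Q h) t k := by
  induction t generalizing k with
  | nil => simp [pvFF, pvCmb]
  | cons c t ih =>
    cases hP : P c <;> cases hQ : Q c
    · simpa [pvFF, hP, hQ] using ih (k + 1) (by omega)
    · simp only [pvFF, hP, hQ, Bool.false_or, if_true, Bool.false_eq_true, if_false, pvCmb]
      by_cases h : pvFF P t (k + 1) = -1
      · simp [h]
      · have := pvFF_ge P t (k + 1) (by omega) h
        simp only [h, if_false]
        split_ifs <;> omega
    · simp only [pvFF, hP, hQ, Bool.or_false, if_true, Bool.false_eq_true, if_false, pvCmb]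
      by_cases h : pvFF Q t (k + 1) = -1
      · simp [h]
        omega
      · have := pvFF_ge Q t (k + 1) (by omega) h
        split_ifs <;> omega
    · simp only [pvFF, hP, hQ, Bool.true_or, if_true, pvCmb]
      split_ifs <;> omega

theorem pvFindGo_eq_FF (c : Char) (t : List Char) (k : Nat) :
    PySem.Chars.find.go [c] t k = pvFF (fun h => c == h) t (k : Int) := by
  induction t generalizing k with
  | nil => simp [PySem.Chars.find.go, pvFF, List.isEmpty]
  | cons h rest ih =>
    have hpre : List.isPrefixOf [c] (h :: rest) = (c == h) := by
      simp [List.isPrefixOf]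
    simp only [PySem.Chars.find.go, pvFF, hpre]
    split_ifs
    · rfl
    · rw [ih (k + 1)]
      push_cast
      ring_nf

theorem pvFF_shift (P : Char → Bool) (t : List Char) (a k : Int) (hk : 0 ≤ k) :
    pvFF P t (a + k) = if pvFF P t k = -1 then -1 else a + pvFF P t k := by
  induction t generalizing k with
  | nil => simp [pvFF]
  | cons c t ih =>
    simp only [pvFF]
    cases hP : P c
    · simp only [Bool.false_eq_true, if_false]
      have := ih (k + 1) (by omega)
      rw [show a + k + 1 = a + (k + 1) by ring, this]
    · simp only [if_true]
      omega

set_option maxHeartbeats 2000000 in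
theorem pvMin4 (a b c d n : Int) :
    (PySem.List.min? (List.filter (fun x => decide (x ≠ -1)) [a, b, c, d]) (fun x => x)).getD n
      = if pvCmb (pvCmb (pvCmb a b) c) d = -1 then n
        else pvCmb (pvCmb (pvCmb a b) c) d := by
  by_cases ha : a = -1 <;> by_cases hb : b = -1 <;> by_cases hc : c = -1 <;> by_cases hd : d = -1 <;>
    simp [PySem.List.min?, pvCmb, ha, hb, hc, hd]
  all_goals (try (split_ifs <;> simp_all))
  all_goals (try (split_ifs <;> simp_all))
  all_goals (try (split_ifs <;> simp_all))
  all_goals omega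

-- the slice-bound normalisation both rfind(·,0,pos) and find(·,pos) perform,
-- written as a two-step clamp
def pvClamp (s : List Char) (pos : Int) : Int :=
  let n : Int := s.length
  let p0 := if pos < 0 then pos + n else pos
  if p0 < 0 then 0 else if p0 > n then n else p0

theorem pvClamp_nonneg (s : List Char) (pos : Int) : 0 ≤ pvClamp s pos := by
  have : (0:Int) ≤ (s.length : Int) := by positivity
  simp only [pvClamp]
  split_ifs <;> omega

theorem pvClamp_le (s : List Char) (pos : Int) : pvClamp s pos ≤ (s.length : Int) := by
  have : (0:Int) ≤ (s.length : Int) := by positivity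
  simp only [pvClamp]
  split_ifs <;> omega

set_option maxHeartbeats 1000000 in
theorem pvRfindFromEq (s sub : List Char) (pos : Int) :
    PySem.Chars.rfindFrom s sub 0 (some pos)
      = PySem.Chars.rfind (s.take (pvClamp s pos).toNat) sub := by
  have hlen : (0:Int) ≤ (s.length : Int) := by positivity
  have hge := pvRfind_ge (s.take (pvClamp s pos).toNat) sub
  have hnn := pvClamp_nonneg s pos
  simp only [PySem.Chars.rfindFrom]
  norm_num
  rw [show (if (s.length:Int) < pos then (s.length:Int)
      else if pos < 0 then if pos + (s.length:Int) < 0 then 0 else pos + (s.length:Int) else pos)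
      = pvClamp s pos from by simp only [pvClamp]; split_ifs <;> omega]
  rw [if_neg (by omega)]
  split_ifs <;> omega

set_option maxHeartbeats 1000000 in
theorem pvFindFromEq (s : List Char) (c : Char) (pos : Int) :
    PySem.Chars.findFrom s [c] pos none
      = (if PySem.Chars.find (s.drop (pvClamp s pos).toNat) [c] = -1 then -1
         else pvClamp s pos + PySem.Chars.find (s.drop (pvClamp s pos).toNat) [c]) := by
  have hlen : (0:Int) ≤ (s.length : Int) := by positivity
  simp only [PySem.Chars.findFrom]
  norm_num
  by_cases hgt : (s.length:Int) < (if pos < 0 then if pos + (s.length:Int) < 0 then 0 else pos + (s.length:Int) else pos)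
  · rw [if_pos hgt]
    have hcl : pvClamp s pos = (s.length:Int) := by
      simp only [pvClamp]; split_ifs at hgt ⊢ <;> omega
    rw [hcl, Int.toNat_natCast, List.drop_length]
    rw [show PySem.Chars.find ([] : List Char) [c] = -1 from rfl]
    norm_num
  · rw [if_neg hgt]
    rw [show (if pos < 0 then if pos + (s.length:Int) < 0 then 0 else pos + (s.length:Int) else pos)
        = pvClamp s pos from by simp only [pvClamp]; split_ifs at hgt ⊢ <;> omega]

-- A's left expression equals a pvH scan over the truncated list
theorem pvLeftEq (s : List Char) (p : Nat) :
    max (max (max (PySem.Chars.rfind (s.take p) ['.']) (PySem.Chars.rfind (s.take p) ['!']))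
        (PySem.Chars.rfind (s.take p) ['?'])) (PySem.Chars.rfind (s.take p) ['\n'])
      = pvH (pvAt (s.take p)) (s.take p).length := by
  have hr : ∀ c : Char, PySem.Chars.rfind (s.take p) [c]
      = pvH (pvAtC c (s.take p)) (s.take p).length := by
    intro c
    show PySem.Chars.rfind.go _ _ _ = _
    rw [pvRfindGo_eq_H]
    simp only [pvH]
    rw [if_neg (by rw [List.drop_length]; simp [List.isPrefixOf])]
    exact pvH_congr (fun j _ => pvPrefSingle _ j c)
  rw [hr, hr, hr, hr, pvH_max, pvH_max, pvH_max]
  apply pvH_congr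
  intro j _
  cases hv : (s.take p)[j]? with
  | none => simp [pvAt, pvAtC, hv]
  | some v =>
    simp only [pvAt, pvAtC, hv]
    rw [pvBeqComm '.' v, pvBeqComm '!' v, pvBeqComm '?' v, pvBeqComm '\n' v]
    simp [pvIsSent, Bool.or_assoc]

-- truncation does not change the backward scan below its bound
theorem pvH_take (s : List Char) (p : Nat) :
    pvH (pvAt (s.take p)) p = pvH (pvAt s) p := by
  apply pvH_congr
  intro j hj
  simp [pvAt, hj]

-- each right-candidate of A as a pvFF scan
theorem pvCandEq (s : List Char) (c : Char) (pos : Int) :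
    (if PySem.Chars.find (s.drop (pvClamp s pos).toNat) [c] = -1 then -1
     else pvClamp s pos + PySem.Chars.find (s.drop (pvClamp s pos).toNat) [c])
      = pvFF (fun h => c == h) (s.drop (pvClamp s pos).toNat) (pvClamp s pos) := by
  have h0 : PySem.Chars.find (s.drop (pvClamp s pos).toNat) [c]
      = pvFF (fun h => c == h) (s.drop (pvClamp s pos).toNat) 0 := by
    show PySem.Chars.find.go _ _ _ = _
    rw [pvFindGo_eq_FF]
    norm_num
  rw [h0, show pvClamp s pos = pvClamp s pos + 0 by ring,
    pvFF_shift _ _ _ 0 (by omega)]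
  norm_num

-- a slice whose stop is the full length is a slice to the end
theorem pvSliceEnd (text : String) (a : Int) :
    PySem.Str.slice text (some a) (some (text.toList.length : Int))
      = PySem.Str.slice text (some a) none := by
  simp only [PySem.Str.slice, PySem.Chars.slice, PySem.List.slice, PySem.List.clampIdx]
  congr 2
  split_ifs <;> omega

-- phase 2 of Source B's loop: once the index has reached p, the loop returns at the
-- first terminator (or the tail slice if there is none)
theorem pvLF (text : String) (p : Int) (hp : 0 ≤ p) (t : List Char) : ∀ (k start : Int), p ≤ k →
    pvLoop text p t k start =
      if pvFF pvIsSent t k = -1 then PySem.Str.strip (PySem.Str.slice text (some start) none)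
      else PySem.Str.strip (PySem.Str.slice text (some start) (some (pvFF pvIsSent t k + 1))) := by
  induction t with
  | nil => intro k start _; simp [pvLoop, pvFF]
  | cons c t ih =>
    intro k start hk
    simp only [pvLoop, pvFF]
    cases hc : pvIsSent c
    · simp only [Bool.false_eq_true, if_false]
      exact ih (k + 1) start (by omega)
    · simp only [if_true, if_pos hk]
      split_ifs with h
      · omega
      · rfl

-- phase 1: below p the loop only moves the sentence-start accumulator, which always
-- equals (last terminator index before the cursor) + 1
theorem pvLB (text : String) (s : List Char) (pn : Nat) (hpn : pn ≤ s.length) :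
    ∀ d k, k + d = pn →
      pvLoop text (pn : Int) (s.drop k) (k : Int) (pvH (pvAt s) k + 1)
        = pvLoop text (pn : Int) (s.drop pn) (pn : Int) (pvH (pvAt s) pn + 1) := by
  intro d
  induction d with
  | zero => intro k hk; subst hk; simp
  | succ d ih =>
    intro k hk
    have hks : k < s.length := by omega
    rw [List.drop_eq_getElem_cons hks]
    simp only [pvLoop]
    have hnotp : ¬ ((pn : Int) ≤ (k : Int)) := by omega
    cases hc : pvIsSent s[k]
    · simp only [Bool.false_eq_true, if_false]
      have hH : pvH (pvAt s) (k + 1) = pvH (pvAt s) k := by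
        simp [pvH, pvAt, List.getElem?_eq_getElem hks, hc]
      have := ih (k + 1) (by omega)
      rw [hH] at this
      exact_mod_cast this
    · simp only [if_true, if_neg hnotp]
      have hH : pvH (pvAt s) (k + 1) = (k : Int) := by
        simp [pvH, pvAt, List.getElem?_eq_getElem hks, hc]
      have := ih (k + 1) (by omega)
      rw [hH] at this
      exact_mod_cast this

theorem pvMain (text : String) (pos : Int) :
    extract_sentence_py text pos = extract_sentence_py_alt text pos := by
  by_cases h : text = ""
  · rw [extract_sentence_py, extract_sentence_py_alt, if_pos h, if_pos h]
  · rw [extract_sentence_py, extract_sentence_py_alt, if_neg h, if_neg h]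
    simp only [PySem.Str.rfindFrom_eq, PySem.Str.findFrom_eq, PySem.Str.len_eq]
    rw [show ".".toList = ['.'] from rfl, show "!".toList = ['!'] from rfl,
      show "?".toList = ['?'] from rfl, show "\n".toList = ['\n'] from rfl]
    have hclamp : max 0 (min (if pos < 0 then pos + (text.toList.length : Int) else pos)
        (text.toList.length : Int)) = pvClamp text.toList pos := by
      have : (0:Int) ≤ (text.toList.length : Int) := by positivity
      simp only [pvClamp]
      split_ifs <;> omega
    rw [hclamp]
    set s := text.toList with hs
    rw [pvRfindFromEq, pvRfindFromEq, pvRfindFromEq, pvRfindFromEq,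
      pvFindFromEq, pvFindFromEq, pvFindFromEq, pvFindFromEq,
      pvLeftEq, pvMin4, pvCandEq, pvCandEq, pvCandEq, pvCandEq]
    have hnn := pvClamp_nonneg s pos
    have hle := pvClamp_le s pos
    rw [pvFF_cmb _ _ _ _ hnn, pvFF_cmb _ _ _ _ hnn, pvFF_cmb _ _ _ _ hnn]
    have hpred : (fun h => (('.' == h || '!' == h) || '?' == h) || '\n' == h) = pvIsSent := by
      funext v
      rw [pvBeqComm '.' v, pvBeqComm '!' v, pvBeqComm '?' v, pvBeqComm '\n' v]
      simp [pvIsSent, Bool.or_assoc]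
    rw [hpred]
    obtain ⟨pn, hcast⟩ : ∃ pn : ℕ, pvClamp s pos = (pn : Int) := ⟨(pvClamp s pos).toNat, by omega⟩
    rw [hcast] at hle ⊢
    simp only [Int.toNat_natCast] at hle ⊢
    have hpnle : pn ≤ s.length := by exact_mod_cast hle
    have hlen : (s.take pn).length = pn := by rw [List.length_take]; omega
    rw [hlen, pvH_take]
    -- B side: rewrite the loop through its two phases
    have h1 := pvLB text s pn hpnle pn 0 (by omega)
    simp only [List.drop_zero, Nat.cast_zero] at h1
    rw [show pvH (pvAt s) 0 + 1 = 0 from by simp [pvH]] at h1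
    rw [h1, pvLF text (pn : Int) (by positivity) _ _ _ (le_refl _)]
    set F := pvFF pvIsSent (s.drop pn) (pn : Int) with hF
    set L := pvH (pvAt s) pn with hLdef
    have hL := pvH_ge (pvAt s) pn
    rw [show (if L ≠ -1 then L + 1 else 0) = L + 1 from by
      split_ifs with hx
      · rfl
      · rw [not_not] at hx; omega]
    by_cases hFe : F = -1
    · rw [if_pos hFe, if_pos hFe, if_neg (by omega), hs, pvSliceEnd]
    · rw [if_neg hFe, if_neg hFe]
      have hflt := pvFF_lt pvIsSent (s.drop pn) (pn : Int) (hF ▸ hFe)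
      rw [List.length_drop] at hflt
      rw [if_pos (by rw [hF]; omega)]

-- ===== VERDICT (by name: the statement is the Claim_ definition above) =====
theorem extract_sentence_py_spec : Claim_equal_extract_sentence_py := by
  intro text pos _
  unfold Spec_extract_sentence_py
  exact pvMain text pos
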